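-- pv_equiv track=rewrite | github.com/contrivancecompanychicago/geneCRISpy | FTOGenerateGene.py | find_strs
-- ===== SOURCE A (Python) =====
-- def find_strs(gene):
--   """Finds all STRs in the given gene."""
--   strs = []
--   for i in range(len(gene) - 1):
--     str_length = 1
--     while i + str_length < len(gene) and gene[i] == gene[i + str_length]:
--       str_length += 1
--     strs.append(gene[i:i + str_length])
--   return strs
-- ===== SOURCE B (Python) =====
-- def find_strs(gene):
--   """Finds all STRs in the given gene."""
--   n = len(gene)
--   runs = [1] * n
--   for j in range(n - 2, -1, -1):
--     if gene[j] == gene[j + 1]: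
--       runs[j] = runs[j + 1] + 1
--   return [gene[i:i + runs[i]] for i in range(n - 1)]
-- ===== Notes on version B (the rewrite author's own statement) =====
-- stated objective: faster
-- what changed: B replaces A's per-position inner while-loop rescan of each run by a single backward pass that precomputes every run length into an array, then slices once per position.
import Mathlib
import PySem

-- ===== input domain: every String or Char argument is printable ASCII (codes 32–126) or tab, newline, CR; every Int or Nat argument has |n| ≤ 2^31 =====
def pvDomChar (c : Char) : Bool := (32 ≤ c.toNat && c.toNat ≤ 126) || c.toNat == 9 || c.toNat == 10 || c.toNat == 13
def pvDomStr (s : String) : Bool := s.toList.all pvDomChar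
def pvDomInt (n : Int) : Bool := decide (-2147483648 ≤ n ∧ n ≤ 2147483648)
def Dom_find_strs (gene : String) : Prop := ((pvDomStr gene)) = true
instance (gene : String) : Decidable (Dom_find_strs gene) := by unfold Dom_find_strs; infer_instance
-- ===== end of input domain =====

-- B precomputes every run length in one backward pass instead of rescanning the run at each position (objective: faster).

-- ===== PORT A =====
-- the inner `while i + str_length < len(gene) and gene[i] == gene[i + str_length]: str_length += 1`
def whileA (g : List Char) (i : Int) (k : Int) : Int :=
  if h : i + k < (g.length : Int) ∧ PySem.List.pyGetD g i ' ' = PySem.List.pyGetD g (i + k) ' '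
  then whileA g i (k + 1) else k
termination_by ((g.length : Int) - (i + k)).toNat
decreasing_by omega

def find_strs (gene : String) : List String :=
  let g := gene.toList
  (PySem.List.pyRange 0 ((g.length : Int) - 1) 1).foldl
    (fun strs i =>
      strs ++ [String.ofList (PySem.List.slice g (some i) (some (i + whileA g i 1)))]) []

-- ===== PORT B =====
def find_strs_alt (gene : String) : List String :=
  let g := gene.toList
  let n : Int := (g.length : Int)
  let runs0 : List Int := PySem.List.pyRepeat [1] n
  let runs := (PySem.List.pyRange (n - 2) (-1) (-1)).foldl
    (fun runs j =>
      if PySem.List.pyGetD g j ' ' = PySem.List.pyGetD g (j + 1) ' '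
      then PySem.List.pySetD runs j (PySem.List.pyGetD runs (j + 1) 0 + 1)
      else runs) runs0
  (PySem.List.pyRange 0 (n - 1) 1).map
    (fun i => String.ofList (PySem.List.slice g (some i) (some (i + PySem.List.pyGetD runs i 0))))

-- ===== PRECONDITION & SPEC =====
def Spec_find_strs (gene : String) (out : List String) : Prop := out = find_strs_alt gene
instance (gene : String) (out : List String) : Decidable (Spec_find_strs gene out) := by unfold Spec_find_strs; infer_instance

-- ===== CLAIM (what is proved, stated in full; the proofs are below) =====
def Claim_equal_find_strs : Prop := ∀ (gene : String), Dom_find_strs gene → Spec_find_strs gene (find_strs gene)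

-- ===== LEMMAS AND PROOFS =====

-- run length at position i: length of the maximal block of copies of g[i] starting at i
def runVal (g : List Char) (i : Nat) : Nat :=
  ((g.drop i).takeWhile (fun c => c = g.getD i ' ')).length

theorem getD_eq_elem (g : List Char) (n : Nat) (h : n < g.length) : g.getD n ' ' = g[n] := by
  simp [List.getD_eq_getElem?_getD, List.getElem?_eq_getElem h]

theorem whileA_eq (g : List Char) (i : Int) (hi0 : 0 ≤ i) (hin : i < (g.length : Int)) :
    ∀ (k : Int), 1 ≤ k →
    whileA g i k = k + (((g.drop (i + k).toNat)).takeWhile (fun c => c = g.getD i.toNat ' ')).length := by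
  suffices H : ∀ (M : ℕ) (k : Int), 1 ≤ k → ((g.length : Int) - (i + k)).toNat = M →
      whileA g i k = k + (((g.drop (i + k).toNat)).takeWhile (fun c => c = g.getD i.toNat ' ')).length by
    intro k hk; exact H _ k hk rfl
  intro M
  induction M using Nat.strong_induction_on with
  | _ M IH =>
    intro k hk hM
    rw [whileA]
    split_ifs with h
    · have hik : i + k < (g.length : Int) := h.1
      have hlt : (i + k).toNat < g.length := by omega
      have hieq : PySem.List.pyGetD g i ' ' = g[i.toNat] :=
        PySem.List.pyGetD_eq_getElem g ' ' hi0 hin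
      have hikeq : PySem.List.pyGetD g (i + k) ' ' = g[(i + k).toNat] :=
        PySem.List.pyGetD_eq_getElem g ' ' (by omega) hik
      have hchar : g[(i + k).toNat] = g.getD i.toNat ' ' := by
        rw [getD_eq_elem g i.toNat (by omega)]
        rw [hieq, hikeq] at h
        exact h.2.symm
      have hd : g.drop (i + k).toNat = g[(i + k).toNat] :: g.drop ((i + k).toNat + 1) :=
        List.drop_eq_getElem_cons hlt
      have hrec := IH (((g.length : Int) - (i + (k + 1))).toNat) (by omega) (k + 1) (by omega) rfl
      rw [hrec]
      have htn : (i + (k + 1)).toNat = (i + k).toNat + 1 := by omega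
      rw [htn]
      rw [hd, List.takeWhile_cons, decide_eq_true hchar, if_pos rfl, List.length_cons]
      push_cast
      ring
    · rcases lt_or_ge (i + k) (g.length : Int) with h1 | h1
      · -- mismatch of characters
        have hlt : (i + k).toNat < g.length := by omega
        have hieq : PySem.List.pyGetD g i ' ' = g[i.toNat] :=
          PySem.List.pyGetD_eq_getElem g ' ' hi0 hin
        have hikeq : PySem.List.pyGetD g (i + k) ' ' = g[(i + k).toNat] :=
          PySem.List.pyGetD_eq_getElem g ' ' (by omega) h1
        have hne : g[(i + k).toNat] ≠ g.getD i.toNat ' ' := by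
          rw [getD_eq_elem g i.toNat (by omega)]
          intro hcon
          exact h ⟨h1, by rw [hieq, hikeq, hcon]⟩
        have hd : g.drop (i + k).toNat = g[(i + k).toNat] :: g.drop ((i + k).toNat + 1) :=
          List.drop_eq_getElem_cons hlt
        rw [hd, List.takeWhile_cons, decide_eq_false hne, if_neg (by simp), List.length_nil]
        push_cast
        ring
      · have hd : g.drop (i + k).toNat = [] := by
          rw [List.drop_eq_nil_iff]
          omega
        rw [hd, List.takeWhile_nil, List.length_nil]
        push_cast
        ring

theorem runVal_head (g : List Char) (j : Nat) (hj : j < g.length) :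
    runVal g j = 1 + ((g.drop (j + 1)).takeWhile (fun c => c = g.getD j ' ')).length := by
  unfold runVal
  rw [List.drop_eq_getElem_cons hj, List.takeWhile_cons,
    decide_eq_true (getD_eq_elem g j hj).symm, if_pos rfl, List.length_cons]
  omega

theorem runVal_rec (g : List Char) (j : Nat) (hj : j + 1 < g.length) :
    runVal g j = if g.getD j ' ' = g.getD (j + 1) ' ' then runVal g (j + 1) + 1 else 1 := by
  rw [runVal_head g j (by omega)]
  rw [List.drop_eq_getElem_cons hj, List.takeWhile_cons]
  have hj1 : g.getD (j + 1) ' ' = g[j + 1] := getD_eq_elem g (j + 1) hj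
  by_cases hc : g.getD j ' ' = g.getD (j + 1) ' '
  · rw [if_pos hc]
    have hp : g[j + 1] = g.getD j ' ' := by rw [← hj1, hc]
    rw [decide_eq_true hp, if_pos rfl, List.length_cons]
    rw [runVal_head g (j + 1) hj]
    have hfun : (fun c => decide (c = g.getD j ' ')) = (fun c => decide (c = g.getD (j + 1) ' ')) := by
      funext c; rw [hc]
    rw [hfun]
    omega
  · have hp : g[j + 1] ≠ g.getD j ' ' := by rw [← hj1]; exact fun hx => hc hx.symm
    rw [decide_eq_false hp, if_neg (by simp), List.length_nil, if_neg hc]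

theorem runVal_last (g : List Char) (j : Nat) (hj : j + 1 = g.length) : runVal g j = 1 := by
  rw [runVal_head g j (by omega)]
  have hd : g.drop (j + 1) = [] := by rw [List.drop_eq_nil_iff]; omega
  rw [hd, List.takeWhile_nil, List.length_nil]

theorem whileA_one (g : List Char) (i : Int) (hi0 : 0 ≤ i) (hin : i < (g.length : Int)) :
    whileA g i 1 = (runVal g i.toNat : Int) := by
  rw [whileA_eq g i hi0 hin 1 (by omega)]
  rw [runVal_head g i.toNat (by omega)]
  rw [show (i + 1).toNat = i.toNat + 1 by omega]
  push_cast
  ring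

theorem getD_set_self (R : List Int) (m : Nat) (v : Int) (h : m < R.length) :
    (R.set m v).getD m 0 = v := by
  simp [List.getD_eq_getElem?_getD, h]

theorem getD_set_ne (R : List Int) (m p : Nat) (v : Int) (h : p ≠ m) :
    (R.set m v).getD p 0 = R.getD p 0 := by
  simp [List.getD_eq_getElem?_getD, Ne.symm h]

theorem runs_inv (g : List Char) : ∀ (m : ℕ), m + 1 ≤ g.length → ∀ (R : List Int),
    R.length = g.length →
    (∀ p, m ≤ p → p < g.length → R.getD p 0 = (runVal g p : Int)) →
    (∀ p, p < m → R.getD p 0 = 1) →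
    ((PySem.List.pyRange ((m : Int) - 1) (-1) (-1)).foldl
      (fun runs j =>
        if PySem.List.pyGetD g j ' ' = PySem.List.pyGetD g (j + 1) ' '
        then PySem.List.pySetD runs j (PySem.List.pyGetD runs (j + 1) 0 + 1)
        else runs) R).length = g.length ∧
    (∀ p, p < g.length → ((PySem.List.pyRange ((m : Int) - 1) (-1) (-1)).foldl
      (fun runs j =>
        if PySem.List.pyGetD g j ' ' = PySem.List.pyGetD g (j + 1) ' '
        then PySem.List.pySetD runs j (PySem.List.pyGetD runs (j + 1) 0 + 1)
        else runs) R).getD p 0 = (runVal g p : Int)) := by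
  intro m
  induction m with
  | zero =>
    intro _ R hlen hhi _
    rw [show ((0 : ℕ) : Int) - 1 = -1 by norm_num]
    rw [PySem.List.pyRange_neg_one_eq_nil (by omega)]
    exact ⟨hlen, fun p hp => hhi p (Nat.zero_le p) hp⟩
  | succ m IH =>
    intro hm R hlen hhi hlo
    have hmlt' : m + 1 < g.length := by omega
    have hms : ((m + 1 : ℕ) : Int) - 1 = (m : Int) := by push_cast; ring
    rw [hms, PySem.List.pyRange_neg_one_cons (by omega), List.foldl_cons]
    -- rewrite the loop body at j = m
    have hgm : PySem.List.pyGetD g (m : Int) ' ' = g.getD m ' ' := by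
      rw [PySem.List.pyGetD_natCast]
    have hgm1 : PySem.List.pyGetD g ((m : Int) + 1) ' ' = g.getD (m + 1) ' ' := by
      rw [show ((m : Int) + 1) = ((m + 1 : ℕ) : Int) by push_cast; ring, PySem.List.pyGetD_natCast]
    have hRm1 : PySem.List.pyGetD R ((m : Int) + 1) 0 = R.getD (m + 1) 0 := by
      rw [show ((m : Int) + 1) = ((m + 1 : ℕ) : Int) by push_cast; ring, PySem.List.pyGetD_natCast]
    by_cases hc : g.getD m ' ' = g.getD (m + 1) ' '
    · rw [if_pos (by rw [hgm, hgm1]; exact hc), PySem.List.pySetD_natCast, hRm1]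
      have hRv : R.getD (m + 1) 0 = (runVal g (m + 1) : Int) := hhi (m + 1) (le_refl _) hmlt'
      rw [hRv]
      have hnew : (R.set m ((runVal g (m + 1) : Int) + 1)).getD m 0 = (runVal g m : Int) := by
        rw [getD_set_self R m _ (by omega)]
        rw [runVal_rec g m hmlt', if_pos hc]
        push_cast; ring
      refine IH (by omega) _ (by simp [hlen]) ?_ ?_
      · intro p hp hplen
        rcases Nat.eq_or_lt_of_le hp with h | h
        · subst h; exact hnew
        · rw [getD_set_ne R m p _ (by omega)]
          exact hhi p (by omega) hplen
      · intro p hp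
        rw [getD_set_ne R m p _ (by omega)]
        exact hlo p (by omega)
    · rw [if_neg (by rw [hgm, hgm1]; exact hc)]
      refine IH (by omega) R hlen ?_ ?_
      · intro p hp hplen
        rcases Nat.eq_or_lt_of_le hp with h | h
        · subst h
          rw [hlo m (by omega), runVal_rec g m hmlt', if_neg hc]
          norm_num
        · exact hhi p (by omega) hplen
      · intro p hp
        exact hlo p (by omega)

-- ===== VERDICT (by name: the statement is the Claim_ definition above) =====
theorem find_strs_spec : Claim_equal_find_strs := by
  intro gene _
  unfold Spec_find_strs find_strs find_strs_alt
  rw [PySem.List.foldl_append_singleton_eq_map]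
  apply List.map_congr_left
  intro i hi
  rw [PySem.List.mem_pyRange_one] at hi
  obtain ⟨hi0, hiu⟩ := hi
  set g := gene.toList with hg
  have h2 : 2 ≤ g.length := by omega
  have hrep : PySem.List.pyRepeat ([1] : List Int) (g.length : Int) = List.replicate g.length 1 := by
    rw [PySem.List.pyRepeat_singleton]
    simp
  rw [hrep]
  have hcall := runs_inv g (g.length - 1) (by omega) (List.replicate g.length (1 : Int))
    (by simp)
    (by
      intro p hp hplen
      rw [List.getD_eq_getElem?_getD]
      simp only [List.getElem?_replicate, if_pos hplen, Option.getD_some]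
      rw [runVal_last g p (by omega)]
      norm_num
    )
    (by
      intro p hp
      rw [List.getD_eq_getElem?_getD]
      simp only [List.getElem?_replicate, if_pos (show p < g.length by omega), Option.getD_some]
    )
  rw [show ((g.length - 1 : ℕ) : Int) - 1 = (g.length : Int) - 2 by omega] at hcall
  obtain ⟨hrlen, hrval⟩ := hcall
  set runs := (PySem.List.pyRange ((g.length : Int) - 2) (-1) (-1)).foldl
      (fun runs j =>
        if PySem.List.pyGetD g j ' ' = PySem.List.pyGetD g (j + 1) ' '
        then PySem.List.pySetD runs j (PySem.List.pyGetD runs (j + 1) 0 + 1)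
        else runs) (List.replicate g.length (1 : Int)) with hruns
  have hwa : whileA g i 1 = (runVal g i.toNat : Int) := whileA_one g i hi0 (by omega)
  have hrd : PySem.List.pyGetD runs i 0 = (runVal g i.toNat : Int) := by
    rw [PySem.List.pyGetD_eq_getElem runs 0 hi0 (by rw [hrlen]; omega)]
    have hv := hrval i.toNat (by omega)
    rw [List.getD_eq_getElem?_getD, List.getElem?_eq_getElem (by rw [hrlen]; omega), Option.getD_some] at hv
    exact hv
  rw [hwa, hrd]
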